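-- pv_equiv track=rewrite | github.com/wenhaogh85/Recursion-Battleship | shipLib.py | createShipCoordinates
-- ===== SOURCE A (Python) =====
-- def createShipCoordinates(coordinates, startCoordinate, length, isHorizontal):
--
--     if length == 0:
--         return coordinates
--
--     elif length > 0:
--
--         if len(coordinates) == 0:
--             coordinates.append(startCoordinate)
--
--         else:
--             if isHorizontal == True:
--                 row = startCoordinate[0]
--                 column = startCoordinate[1] + len(coordinates)
--
--             elif isHorizontal == False:
--                 row = startCoordinate[0] + len(coordinates)
--                 column = startCoordinate[1]
--
--             coordinates.append([row, column])
--
--     return createShipCoordinates(coordinates, startCoordinate, length - 1, isHorizontal)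
-- ===== SOURCE B (Python) =====
-- def createShipCoordinates(coordinates, startCoordinate, length, isHorizontal):
--     if length <= 0:
--         return coordinates
--     if not coordinates:
--         coordinates.append(startCoordinate)
--         length -= 1
--         if length == 0:
--             return coordinates
--     r, c = startCoordinate[0], startCoordinate[1]
--     base = len(coordinates)
--     if isHorizontal:
--         coordinates.extend([r, c + k] for k in range(base, base + length))
--     else:
--         coordinates.extend([r + k, c] for k in range(base, base + length))
--     return coordinates
-- ===== Notes on version B (the rewrite author's own statement) =====
-- stated objective: simpler
-- what changed: Replaces A's one-cell-per-recursive-call scheme (recomputing len(coordinates) each call) with a single bulk extend of a comprehension over a precomputed index range.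
import Mathlib
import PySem

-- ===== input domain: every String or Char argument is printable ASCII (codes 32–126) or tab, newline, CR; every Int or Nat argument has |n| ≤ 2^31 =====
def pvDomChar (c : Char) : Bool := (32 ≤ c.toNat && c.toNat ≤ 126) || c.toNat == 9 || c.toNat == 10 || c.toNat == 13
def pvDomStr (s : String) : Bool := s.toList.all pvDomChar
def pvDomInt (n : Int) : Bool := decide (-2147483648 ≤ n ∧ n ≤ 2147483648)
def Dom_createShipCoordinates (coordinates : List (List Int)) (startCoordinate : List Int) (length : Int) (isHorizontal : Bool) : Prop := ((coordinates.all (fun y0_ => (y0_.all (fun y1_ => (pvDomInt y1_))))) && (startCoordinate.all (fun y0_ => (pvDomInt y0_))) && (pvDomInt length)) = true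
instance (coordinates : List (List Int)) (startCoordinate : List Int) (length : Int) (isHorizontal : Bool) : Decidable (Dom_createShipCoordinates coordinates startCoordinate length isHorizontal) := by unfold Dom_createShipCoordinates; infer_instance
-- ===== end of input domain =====

-- B replaces A's one-cell-per-recursive-call construction with one bulk append of a
-- comprehension over a precomputed index range (objective: simpler). Both A and B mutate
-- the passed-in list identically; the equivalence proved here is about the return value.


-- ===== PORT A =====
-- literal transliteration of A; for length < 0 the Python recurses without a base case
-- (RecursionError, outside Pre_), so the port returns the accumulator there.
def createShipCoordinates (coordinates : List (List Int)) (startCoordinate : List Int) (length : Int) (isHorizontal : Bool) : List (List Int) :=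
  if length = 0 then coordinates
  else if 0 < length then
    let coordinates :=
      if coordinates.length = 0 then coordinates ++ [startCoordinate]
      else
        if isHorizontal then
          coordinates ++ [[(PySem.List.pyGet? startCoordinate 0).getD 0,
                           (PySem.List.pyGet? startCoordinate 1).getD 0 + (coordinates.length : Int)]]
        else
          coordinates ++ [[(PySem.List.pyGet? startCoordinate 0).getD 0 + (coordinates.length : Int),
                           (PySem.List.pyGet? startCoordinate 1).getD 0]]
    createShipCoordinates coordinates startCoordinate (length - 1) isHorizontal
  else coordinates
termination_by length.toNat
decreasing_by omega

-- ===== PORT B =====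
def createShipCoordinates_alt (coordinates : List (List Int)) (startCoordinate : List Int) (length : Int) (isHorizontal : Bool) : List (List Int) :=
  if length ≤ 0 then coordinates
  else
    let p : List (List Int) × Int :=
      if coordinates.length = 0 then (coordinates ++ [startCoordinate], length - 1)
      else (coordinates, length)
    let coordinates := p.1
    let length := p.2
    if length = 0 then coordinates
    else
      let r := (PySem.List.pyGet? startCoordinate 0).getD 0
      let c := (PySem.List.pyGet? startCoordinate 1).getD 0
      let base : Int := (coordinates.length : Int)
      if isHorizontal then
        coordinates ++ (PySem.List.pyRange base (base + length) 1).map (fun k => [r, c + k])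
      else
        coordinates ++ (PySem.List.pyRange base (base + length) 1).map (fun k => [r + k, c])

-- ===== PRECONDITION & SPEC =====
-- Pre_ excludes exactly the inputs where A raises: negative length (unbounded recursion,
-- RecursionError) and the cases where startCoordinate[0]/[1] is indexed while startCoordinate
-- is shorter than 2 (IndexError): that indexing happens iff length ≥ 1 and (coordinates is
-- nonempty or length ≥ 2).
def Pre_createShipCoordinates (coordinates : List (List Int)) (startCoordinate : List Int) (length : Int) (isHorizontal : Bool) : Prop :=
  0 ≤ length ∧ ((1 ≤ length ∧ (coordinates ≠ [] ∨ 2 ≤ length)) → 2 ≤ startCoordinate.length)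
instance (coordinates : List (List Int)) (startCoordinate : List Int) (length : Int) (isHorizontal : Bool) : Decidable (Pre_createShipCoordinates coordinates startCoordinate length isHorizontal) := by unfold Pre_createShipCoordinates; infer_instance
def pvWitness_createShipCoordinates : List (List Int) × List Int × Int × Bool := ([], [2, 3], 4, true)

def Spec_createShipCoordinates (coordinates : List (List Int)) (startCoordinate : List Int) (length : Int) (isHorizontal : Bool) (out : List (List Int)) : Prop := out = createShipCoordinates_alt coordinates startCoordinate length isHorizontal
instance (coordinates : List (List Int)) (startCoordinate : List Int) (length : Int) (isHorizontal : Bool) (out : List (List Int)) : Decidable (Spec_createShipCoordinates coordinates startCoordinate length isHorizontal out) := by unfold Spec_createShipCoordinates; infer_instance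

-- ===== CLAIM (what is proved, stated in full; the proofs are below) =====
def Claim_equal_createShipCoordinates : Prop := ∀ (coordinates : List (List Int)) (startCoordinate : List Int) (length : Int) (isHorizontal : Bool), Dom_createShipCoordinates coordinates startCoordinate length isHorizontal → Pre_createShipCoordinates coordinates startCoordinate length isHorizontal → Spec_createShipCoordinates coordinates startCoordinate length isHorizontal (createShipCoordinates coordinates startCoordinate length isHorizontal)

-- ===== LEMMAS AND PROOFS =====

-- The per-step cell A appends given the current accumulator length.
def pvCell (startCoordinate : List Int) (isHorizontal : Bool) (k : Int) : List Int :=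
  if isHorizontal then
    [(PySem.List.pyGet? startCoordinate 0).getD 0,
     (PySem.List.pyGet? startCoordinate 1).getD 0 + k]
  else
    [(PySem.List.pyGet? startCoordinate 0).getD 0 + k,
     (PySem.List.pyGet? startCoordinate 1).getD 0]

-- A on a NONEMPTY accumulator equals the accumulator plus the range-comprehension block.
theorem createShipCoordinates_closed (coords : List (List Int)) (sc : List Int) (n : Int)
    (h : Bool) (hn : 0 ≤ n) (hne : coords ≠ []) :
    createShipCoordinates coords sc n h =
      coords ++ (PySem.List.pyRange (coords.length : Int) ((coords.length : Int) + n) 1).map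
        (pvCell sc h) := by
  obtain ⟨m, rfl⟩ : ∃ m : Nat, n = (m : Int) := ⟨n.toNat, (Int.toNat_of_nonneg hn).symm⟩
  induction m generalizing coords with
  | zero =>
      rw [createShipCoordinates]
      simp [PySem.List.pyRange_one_eq_nil (by omega)]
  | succ m ih =>
      rw [createShipCoordinates]
      have hlen0 : coords.length ≠ 0 := by simpa using hne
      have hlt : (coords.length : Int) < (coords.length : Int) + (m + 1 : Nat) := by
        push_cast; omega
      rw [if_neg (by push_cast; omega), if_pos (by push_cast; omega), if_neg hlen0]
      have harith : ((m + 1 : Nat) : Int) - 1 = (m : Int) := by push_cast; ring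
      rw [PySem.List.pyRange_one_cons hlt]
      rw [harith]
      cases h with
      | true =>
          simp only [Bool.false_eq_true, reduceIte]
          rw [ih (coords ++ [[(PySem.List.pyGet? sc 0).getD 0,
            (PySem.List.pyGet? sc 1).getD 0 + (coords.length : Int)]]) (by simp) (by simp)]
          simp only [pvCell, reduceIte, List.map_cons, List.append_assoc, List.length_append,
            List.length_cons, List.length_nil, List.cons_append, List.nil_append]
          push_cast; ring_nf
      | false =>
          simp only [Bool.false_eq_true, reduceIte]
          rw [ih (coords ++ [[(PySem.List.pyGet? sc 0).getD 0 + (coords.length : Int),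
            (PySem.List.pyGet? sc 1).getD 0]]) (by simp) (by simp)]
          simp only [pvCell, Bool.false_eq_true, reduceIte, List.map_cons, List.append_assoc,
            List.length_append, List.length_cons, List.length_nil, List.cons_append,
            List.nil_append]
          push_cast; ring_nf

-- ===== VERDICT (by name: the statement is the Claim_ definition above) =====
theorem createShipCoordinates_spec : Claim_equal_createShipCoordinates := by
  intro coords sc n h _ hpre
  obtain ⟨hn, _⟩ := hpre
  unfold Spec_createShipCoordinates
  by_cases hz : n = 0
  · subst hz
    rw [createShipCoordinates, if_pos rfl]
    simp [createShipCoordinates_alt]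
  · have hpos : 0 < n := by omega
    cases coords with
    | nil =>
        rw [createShipCoordinates, if_neg hz, if_pos hpos]
        simp only [List.length_nil, reduceIte, List.nil_append]
        by_cases h1 : n = 1
        · subst h1
          rw [createShipCoordinates, if_pos (by ring)]
          simp [createShipCoordinates_alt]
        · rw [createShipCoordinates_closed [sc] sc (n - 1) h (by omega) (by simp)]
          cases h <;>
            simp [createShipCoordinates_alt, pvCell, if_neg (by omega : ¬ n ≤ 0),
              if_neg (by omega : ¬ n - 1 = 0), show (1 : Int) + (n - 1) = n by ring]
    | cons x xs =>
        rw [createShipCoordinates_closed (x :: xs) sc n h hn (by simp)]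
        simp only [createShipCoordinates_alt, if_neg (by omega : ¬ n ≤ 0)]
        simp only [List.length_cons, if_neg (by omega : ¬ xs.length + 1 = 0)]
        simp only [if_neg hz]
        cases h <;> simp [pvCell]
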